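-- pv_equiv track=rewrite | github.com/dpowellm/stratum-lab | stratum_lab/privacy.py | compute_node_data_domains
-- ===== SOURCE A (Python) =====
-- DOMAIN_KEYWORDS = {
--     "personal_identifiable": ["user", "name", "email", "address", "phone", "ssn", "profile", "identity", "person", "contact", "customer"],
--     "financial": ["payment", "transaction", "account", "balance", "credit", "invoice", "price", "billing", "finance", "bank", "salary", "compensation"],
--     "health_medical": ["health", "medical", "diagnosis", "patient", "prescription", "clinical", "symptom", "vitals", "hipaa", "phi"],
--     "credentials_secrets": ["api_key", "password", "token", "secret", "credential", "certificate", "auth", "key", "oauth"],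
--     "behavioral_preference": ["history", "preference", "browsing", "purchase", "behavior", "analytics", "tracking", "cookie"],
--     "organizational_internal": ["employee", "hr", "strategy", "internal", "confidential", "proprietary", "memo", "policy", "org"],
--     "communication_content": ["email", "message", "chat", "slack", "notification", "inbox", "mail", "correspondence"],
--     "location_temporal": ["location", "gps", "calendar", "schedule", "timezone", "meeting", "appointment", "geo"],
-- }
--
-- def classify_data_domain(text: str) -> list[str]:
--     """Classify a text string into data domains via keyword substring matching."""
--     lower = text.lower()
--     matched: list[str] = []
--     for domain, keywords in DOMAIN_KEYWORDS.items():
--         if any(kw in lower for kw in keywords):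
--             matched.append(domain)
--     return sorted(set(matched)) if matched else ["generic"]
--
-- def compute_node_data_domains(node_id: str, tool_names: list[str], state_keys: list[str]) -> list[str]:
--     """Union of data domains from all tools and state keys for a node."""
--     domains: set[str] = set()
--     for tool in tool_names:
--         domains.update(classify_data_domain(tool))
--     for key in state_keys:
--         domains.update(classify_data_domain(key))
--     result = sorted(domains)
--     return result if result else ["generic"]
-- ===== SOURCE B (Python) =====
-- DOMAIN_KEYWORDS = {
--     "personal_identifiable": ["user", "name", "email", "address", "phone", "ssn", "profile", "identity", "person", "contact", "customer"],
--     "financial": ["payment", "transaction", "account", "balance", "credit", "invoice", "price", "billing", "finance", "bank", "salary", "compensation"],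
--     "health_medical": ["health", "medical", "diagnosis", "patient", "prescription", "clinical", "symptom", "vitals", "hipaa", "phi"],
--     "credentials_secrets": ["api_key", "password", "token", "secret", "credential", "certificate", "auth", "key", "oauth"],
--     "behavioral_preference": ["history", "preference", "browsing", "purchase", "behavior", "analytics", "tracking", "cookie"],
--     "organizational_internal": ["employee", "hr", "strategy", "internal", "confidential", "proprietary", "memo", "policy", "org"],
--     "communication_content": ["email", "message", "chat", "slack", "notification", "inbox", "mail", "correspondence"],
--     "location_temporal": ["location", "gps", "calendar", "schedule", "timezone", "meeting", "appointment", "geo"],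
-- }
--
--
-- def compute_node_data_domains(node_id: str, tool_names: list[str], state_keys: list[str]) -> list[str]:
--     """Domain-major scan: for each domain, collect the texts it covers; any text
--     left uncovered by every domain contributes 'generic'."""
--     texts = [t.lower() for t in tool_names + state_keys]
--     domains: list[str] = []
--     covered: set[str] = set()
--     for domain, kws in DOMAIN_KEYWORDS.items():
--         hit = [lo for lo in texts if any(kw in lo for kw in kws)]
--         if hit:
--             domains.append(domain)
--             covered.update(hit)
--     if any(lo not in covered for lo in texts):
--         domains.append("generic")
--     return sorted(domains) if domains else ["generic"]
-- ===== Notes on version B (the rewrite author's own statement) =====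
-- stated objective: alternative
-- what changed: B inverts the loop nesting: instead of classifying each text against the whole keyword table (text-major, per-text sorted classification lists unioned into a set), B makes one domain-major pass over DOMAIN_KEYWORDS collecting, per domain, the lowered texts it covers into a covered-set, appending each matching domain once to an already-duplicate-free list, and derives 'generic' afterwards from the texts left uncovered by every domain.
import Mathlib
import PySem

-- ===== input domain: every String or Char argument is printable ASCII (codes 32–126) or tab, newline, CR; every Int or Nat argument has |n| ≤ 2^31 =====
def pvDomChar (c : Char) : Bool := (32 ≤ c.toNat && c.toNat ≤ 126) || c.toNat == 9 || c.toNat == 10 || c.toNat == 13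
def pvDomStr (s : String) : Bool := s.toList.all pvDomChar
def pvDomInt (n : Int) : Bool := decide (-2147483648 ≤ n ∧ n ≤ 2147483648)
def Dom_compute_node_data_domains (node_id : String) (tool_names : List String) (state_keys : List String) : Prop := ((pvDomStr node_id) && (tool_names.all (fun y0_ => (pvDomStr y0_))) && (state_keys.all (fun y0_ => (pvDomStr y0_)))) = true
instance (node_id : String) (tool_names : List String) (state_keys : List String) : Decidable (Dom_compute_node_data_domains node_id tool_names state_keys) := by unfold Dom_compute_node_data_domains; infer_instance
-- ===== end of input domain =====

-- B is domain-major instead of text-major: one pass over the DOMAIN_KEYWORDS table collecting,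
-- per domain, the texts it covers; a text covered by no domain yields "generic" (objective: alternative).

-- module constant shared by both programs
def DOMAIN_KEYWORDS : List (String × List String) := [
  ("personal_identifiable", ["user", "name", "email", "address", "phone", "ssn", "profile", "identity", "person", "contact", "customer"]),
  ("financial", ["payment", "transaction", "account", "balance", "credit", "invoice", "price", "billing", "finance", "bank", "salary", "compensation"]),
  ("health_medical", ["health", "medical", "diagnosis", "patient", "prescription", "clinical", "symptom", "vitals", "hipaa", "phi"]),
  ("credentials_secrets", ["api_key", "password", "token", "secret", "credential", "certificate", "auth", "key", "oauth"]),
  ("behavioral_preference", ["history", "preference", "browsing", "purchase", "behavior", "analytics", "tracking", "cookie"]),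
  ("organizational_internal", ["employee", "hr", "strategy", "internal", "confidential", "proprietary", "memo", "policy", "org"]),
  ("communication_content", ["email", "message", "chat", "slack", "notification", "inbox", "mail", "correspondence"]),
  ("location_temporal", ["location", "gps", "calendar", "schedule", "timezone", "meeting", "appointment", "geo"])]

-- ===== PORT A =====
def classify_data_domain (text : String) : List String :=
  let lower := PySem.Str.lower text
  let matched : List String := DOMAIN_KEYWORDS.foldl
    (fun acc p => if p.2.any (fun kw => PySem.Str.isIn kw lower) then acc ++ [p.1] else acc) []
  if matched = [] then ["generic"]
  else PySem.List.sorted (PySem.Set.ofList matched) (fun x => x) false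

def compute_node_data_domains (node_id : String) (tool_names : List String) (state_keys : List String) : List String :=
  let domains : PySem.Set String := PySem.Set.empty
  let domains := tool_names.foldl (fun d tool => PySem.Set.update d (classify_data_domain tool)) domains
  let domains := state_keys.foldl (fun d key => PySem.Set.update d (classify_data_domain key)) domains
  let result := PySem.List.sorted domains (fun x => x) false
  if result = [] then ["generic"] else result

-- ===== PORT B =====
-- the body of B's loop over DOMAIN_KEYWORDS.items(): state = (domains list, covered set)
def pvStepB (texts : List String) : (List String × PySem.Set String) → (String × List String) → (List String × PySem.Set String) :=
  fun st p =>
    let hit := texts.filter (fun lo => p.2.any (fun kw => PySem.Str.isIn kw lo))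
    if hit = [] then st else (st.1 ++ [p.1], PySem.Set.update st.2 hit)

def compute_node_data_domains_alt (node_id : String) (tool_names : List String) (state_keys : List String) : List String :=
  let texts := (tool_names ++ state_keys).map PySem.Str.lower
  let st := DOMAIN_KEYWORDS.foldl (pvStepB texts) ([], PySem.Set.empty)
  let domains := if texts.any (fun lo => !(PySem.Set.contains st.2 lo)) then st.1 ++ ["generic"] else st.1
  if domains = [] then ["generic"] else PySem.List.sorted domains (fun x => x) false

-- ===== PRECONDITION & SPEC =====
def Spec_compute_node_data_domains (node_id : String) (tool_names : List String) (state_keys : List String) (out : List String) : Prop := out = compute_node_data_domains_alt node_id tool_names state_keys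
instance (node_id : String) (tool_names : List String) (state_keys : List String) (out : List String) : Decidable (Spec_compute_node_data_domains node_id tool_names state_keys out) := by unfold Spec_compute_node_data_domains; infer_instance

-- ===== CLAIM =====
def Claim_equal_compute_node_data_domains : Prop := ∀ (node_id : String) (tool_names : List String) (state_keys : List String), Dom_compute_node_data_domains node_id tool_names state_keys → Spec_compute_node_data_domains node_id tool_names state_keys (compute_node_data_domains node_id tool_names state_keys)

-- ===== LEMMAS AND PROOFS =====

-- classify's matched list, in closed form
def pvMatched (text : String) : List String :=
  (DOMAIN_KEYWORDS.filter
    (fun p => p.2.any (fun kw => PySem.Str.isIn kw (PySem.Str.lower text)))).map (fun p => p.1)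

def pvHits (text : String) : PySem.Set String := PySem.Set.ofList (pvMatched text)

theorem classify_eq (t : String) :
    classify_data_domain t =
      (if pvMatched t = [] then ["generic"]
       else PySem.List.sorted (PySem.Set.ofList (pvMatched t)) (fun x => x) false) := by
  simp only [classify_data_domain, pvMatched]
  simp only [PySem.List.foldl_append_if]
  rfl

theorem ofList_nil_iff (l : List String) : PySem.Set.ofList l = [] ↔ l = [] := by
  constructor
  · intro h
    cases hm : l with
    | nil => rfl
    | cons x xs =>
      exfalso
      have : x ∈ PySem.Set.ofList l := by
        rw [PySem.Set.mem_ofList, hm]; exact List.mem_cons_self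
      rw [h] at this; exact List.not_mem_nil this
  · intro h; rw [h]; rfl

theorem mem_classify (t : String) (s : String) :
    s ∈ classify_data_domain t ↔ (s ∈ pvHits t ∨ (pvHits t = [] ∧ s = "generic")) := by
  rw [classify_eq, pvHits, ofList_nil_iff]
  split
  · rename_i h
    simp [h]
  · rename_i h
    rw [(PySem.List.sorted_perm _ _ _).mem_iff, PySem.Set.mem_ofList]
    simp [h]

theorem mem_pvHits (t s : String) :
    s ∈ pvHits t ↔ ∃ p ∈ DOMAIN_KEYWORDS, p.1 = s ∧ p.2.any (fun kw => PySem.Str.isIn kw (PySem.Str.lower t)) = true := by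
  simp only [pvHits, pvMatched, PySem.Set.mem_ofList, List.mem_map, List.mem_filter]
  constructor
  · rintro ⟨p, ⟨hp, hm⟩, rfl⟩; exact ⟨p, hp, rfl, hm⟩
  · rintro ⟨p, hp, rfl, hm⟩; exact ⟨p, ⟨hp, hm⟩, rfl⟩

theorem pvHits_nil_iff (t : String) :
    pvHits t = [] ↔ ∀ p ∈ DOMAIN_KEYWORDS, p.2.any (fun kw => PySem.Str.isIn kw (PySem.Str.lower t)) = false := by
  rw [pvHits, ofList_nil_iff, pvMatched, List.map_eq_nil_iff, List.filter_eq_nil_iff]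
  simp

-- A-side fold: membership and nodup
theorem memA (T : List String) (init : PySem.Set String) (s : String) :
    s ∈ T.foldl (fun d t => PySem.Set.update d (classify_data_domain t)) init ↔
      s ∈ init ∨ ∃ t ∈ T, s ∈ classify_data_domain t := by
  induction T generalizing init with
  | nil => simp
  | cons x xs ih =>
    simp only [List.foldl_cons, ih, PySem.Set.mem_update, List.mem_cons]
    constructor
    · rintro ((h | h) | ⟨t, ht, hs⟩)
      · exact Or.inl h
      · exact Or.inr ⟨x, Or.inl rfl, h⟩
      · exact Or.inr ⟨t, Or.inr ht, hs⟩
    · rintro (h | ⟨t, (rfl | ht), hs⟩)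
      · exact Or.inl (Or.inl h)
      · exact Or.inl (Or.inr hs)
      · exact Or.inr ⟨t, ht, hs⟩

theorem nodupA (T : List String) (init : PySem.Set String) (h : init.Nodup) :
    (T.foldl (fun d t => PySem.Set.update d (classify_data_domain t)) init).Nodup := by
  induction T generalizing init with
  | nil => exact h
  | cons x xs ih => exact ih _ (PySem.Set.nodup_update _ _ h)

-- B-side fold over the keyword table: membership of the domains list
theorem memB_fst (texts : List String) (KW : List (String × List String))
    (st : List String × PySem.Set String) (s : String) :
    s ∈ (KW.foldl (pvStepB texts) st).1 ↔
      s ∈ st.1 ∨ ∃ p ∈ KW, p.1 = s ∧ ∃ lo ∈ texts, p.2.any (fun kw => PySem.Str.isIn kw lo) = true := by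
  induction KW generalizing st with
  | nil => simp
  | cons x xs ih =>
    simp only [List.foldl_cons, ih, pvStepB, List.mem_cons]
    by_cases h : texts.filter (fun lo => x.2.any (fun kw => PySem.Str.isIn kw lo)) = []
    · rw [if_pos h]
      rw [List.filter_eq_nil_iff] at h
      constructor
      · rintro (hs | ⟨p, hp, rfl, hl⟩)
        · exact Or.inl hs
        · exact Or.inr ⟨p, Or.inr hp, rfl, hl⟩
      · rintro (hs | ⟨p, (rfl | hp), rfl, lo, hlo, hm⟩)
        · exact Or.inl hs
        · exact absurd hm (by simpa using h lo hlo)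
        · exact Or.inr ⟨p, hp, rfl, lo, hlo, hm⟩
    · rw [if_neg h]
      obtain ⟨lo, hlo, hm⟩ : ∃ lo ∈ texts, x.2.any (fun kw => PySem.Str.isIn kw lo) = true := by
        rcases List.exists_mem_of_ne_nil _ h with ⟨y, hy⟩
        rw [List.mem_filter] at hy
        exact ⟨y, hy.1, hy.2⟩
      simp only [List.mem_append, List.mem_singleton]
      constructor
      · rintro ((hs | rfl) | ⟨p, hp, rfl, hl⟩)
        · exact Or.inl hs
        · exact Or.inr ⟨x, Or.inl rfl, rfl, lo, hlo, hm⟩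
        · exact Or.inr ⟨p, Or.inr hp, rfl, hl⟩
      · rintro (hs | ⟨p, (rfl | hp), rfl, hl⟩)
        · exact Or.inl (Or.inl hs)
        · exact Or.inl (Or.inr rfl)
        · exact Or.inr ⟨p, hp, rfl, hl⟩

-- B-side fold: membership of the covered set
theorem memB_snd (texts : List String) (KW : List (String × List String))
    (st : List String × PySem.Set String) (lo : String) :
    lo ∈ (KW.foldl (pvStepB texts) st).2 ↔
      lo ∈ st.2 ∨ ∃ p ∈ KW, lo ∈ texts ∧ p.2.any (fun kw => PySem.Str.isIn kw lo) = true := by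
  induction KW generalizing st with
  | nil => simp
  | cons x xs ih =>
    simp only [List.foldl_cons, ih, pvStepB, List.mem_cons]
    by_cases h : texts.filter (fun lo => x.2.any (fun kw => PySem.Str.isIn kw lo)) = []
    · rw [if_pos h]
      rw [List.filter_eq_nil_iff] at h
      constructor
      · rintro (hs | ⟨p, hp, hl, hm⟩)
        · exact Or.inl hs
        · exact Or.inr ⟨p, Or.inr hp, hl, hm⟩
      · rintro (hs | ⟨p, (rfl | hp), hl, hm⟩)
        · exact Or.inl hs
        · exact absurd hm (by simpa using h lo hl)
        · exact Or.inr ⟨p, hp, hl, hm⟩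
    · rw [if_neg h]
      simp only [PySem.Set.mem_update, List.mem_filter]
      constructor
      · rintro ((hs | ⟨hl, hm⟩) | ⟨p, hp, hl, hm⟩)
        · exact Or.inl hs
        · exact Or.inr ⟨x, Or.inl rfl, hl, hm⟩
        · exact Or.inr ⟨p, Or.inr hp, hl, hm⟩
      · rintro (hs | ⟨p, (rfl | hp), hl, hm⟩)
        · exact Or.inl (Or.inl hs)
        · exact Or.inl (Or.inr ⟨hl, hm⟩)
        · exact Or.inr ⟨p, hp, hl, hm⟩

-- B-side fold: the domains list stays duplicate-free
theorem nodupB_fst (texts : List String) (KW : List (String × List String))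
    (st : List String × PySem.Set String)
    (h1 : st.1.Nodup) (h2 : ∀ p ∈ KW, p.1 ∉ st.1) (h3 : (KW.map Prod.fst).Nodup) :
    (KW.foldl (pvStepB texts) st).1.Nodup := by
  induction KW generalizing st with
  | nil => exact h1
  | cons x xs ih =>
    rw [List.map_cons, List.nodup_cons] at h3
    refine ih _ ?_ ?_ h3.2
    · simp only [pvStepB]
      split
      · exact h1
      · exact List.Nodup.append h1 (List.nodup_singleton _)
          (by simpa using h2 x List.mem_cons_self)
    · intro p hp
      simp only [pvStepB]
      split
      · exact h2 p (List.mem_cons_of_mem _ hp)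
      · simp only [List.mem_append, List.mem_singleton]
        rintro (hin | heq)
        · exact h2 p (List.mem_cons_of_mem _ hp) hin
        · exact h3.1 (heq ▸ List.mem_map_of_mem hp)

-- the two accumulated collections are permutations of each other
theorem sets_perm (T : List String) :
    (T.foldl (fun d t => PySem.Set.update d (classify_data_domain t)) PySem.Set.empty).Perm
      (let texts := T.map PySem.Str.lower
       let st := DOMAIN_KEYWORDS.foldl (pvStepB texts) ([], PySem.Set.empty)
       if texts.any (fun lo => !(PySem.Set.contains st.2 lo)) then st.1 ++ ["generic"] else st.1) := by
  simp only
  apply (List.perm_ext_iff_of_nodup _ _).mpr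
  · intro s
    rw [memA]
    have hfst := memB_fst (T.map PySem.Str.lower) DOMAIN_KEYWORDS ([], PySem.Set.empty) s
    -- the flag: some text uncovered ↔ some original text classified only as generic
    have hflag : (T.map PySem.Str.lower).any
        (fun lo => !(PySem.Set.contains (DOMAIN_KEYWORDS.foldl (pvStepB (T.map PySem.Str.lower)) ([], PySem.Set.empty)).2 lo)) = true
        ↔ ∃ t ∈ T, pvHits t = [] := by
      simp only [List.any_eq_true, List.mem_map, Bool.not_eq_true',
        PySem.Set.contains_eq_listContains, List.contains_eq_mem, decide_eq_false_iff_not]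
      constructor
      · rintro ⟨lo, ⟨t, ht, rfl⟩, hnc⟩
        refine ⟨t, ht, (pvHits_nil_iff t).mpr ?_⟩
        intro p hp
        by_contra hm
        exact hnc ((memB_snd _ _ _ _).mpr (Or.inr ⟨p, hp, List.mem_map_of_mem ht, by simpa using hm⟩))
      · rintro ⟨t, ht, hnil⟩
        rw [pvHits_nil_iff] at hnil
        refine ⟨PySem.Str.lower t, ⟨t, ht, rfl⟩, ?_⟩
        intro hc
        rcases (memB_snd _ _ _ _).mp hc with h | ⟨p, hp, _, hm⟩
        · exact List.not_mem_nil h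
        · rw [hnil p hp] at hm; cases hm
    -- membership in the domains list ↔ some text's hits contain s
    have hfst' : s ∈ (DOMAIN_KEYWORDS.foldl (pvStepB (T.map PySem.Str.lower)) ([], PySem.Set.empty)).1
        ↔ ∃ t ∈ T, s ∈ pvHits t := by
      rw [hfst]
      simp only [List.not_mem_nil, false_or, List.mem_map]
      constructor
      · rintro ⟨p, hp, rfl, lo, ⟨t, ht, rfl⟩, hm⟩
        exact ⟨t, ht, (mem_pvHits t _).mpr ⟨p, hp, rfl, hm⟩⟩
      · rintro ⟨t, ht, hs⟩
        rcases (mem_pvHits t s).mp hs with ⟨p, hp, rfl, hm⟩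
        exact ⟨p, hp, rfl, PySem.Str.lower t, ⟨t, ht, rfl⟩, hm⟩
    split
    · rename_i hfl
      rw [hflag] at hfl
      simp only [List.mem_append, List.mem_singleton, hfst']
      constructor
      · rintro (h | ⟨t, ht, hs⟩)
        · exact absurd h List.not_mem_nil
        · rcases (mem_classify t s).mp hs with h | ⟨_, rfl⟩
          · exact Or.inl ⟨t, ht, h⟩
          · exact Or.inr rfl
      · rintro (⟨t, ht, hs⟩ | rfl)
        · exact Or.inr ⟨t, ht, (mem_classify t s).mpr (Or.inl hs)⟩
        · obtain ⟨t, ht, hnil⟩ := hfl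
          exact Or.inr ⟨t, ht, (mem_classify t _).mpr (Or.inr ⟨hnil, rfl⟩)⟩
    · rename_i hfl
      rw [hflag] at hfl
      push Not at hfl
      rw [hfst']
      constructor
      · rintro (h | ⟨t, ht, hs⟩)
        · exact absurd h List.not_mem_nil
        · rcases (mem_classify t s).mp hs with h | ⟨hnil, rfl⟩
          · exact ⟨t, ht, h⟩
          · exact absurd hnil (hfl t ht)
      · rintro ⟨t, ht, hs⟩
        exact Or.inr ⟨t, ht, (mem_classify t s).mpr (Or.inl hs)⟩
  · exact nodupA _ _ List.nodup_nil
  · have hnd : (DOMAIN_KEYWORDS.foldl (pvStepB (T.map PySem.Str.lower)) ([], PySem.Set.empty)).1.Nodup :=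
      nodupB_fst _ _ _ List.nodup_nil (by intro p _ h; exact List.not_mem_nil h) (by decide)
    split
    · refine List.Nodup.append hnd (List.nodup_singleton _) ?_
      intro a ha hb
      rw [List.mem_singleton] at hb
      subst hb
      rcases (memB_fst _ _ _ _).mp ha with h | ⟨p, hp, hps, _⟩
      · exact List.not_mem_nil h
      · have hg : ("generic" : String) ∈ DOMAIN_KEYWORDS.map Prod.fst := hps ▸ List.mem_map_of_mem hp
        exact absurd hg (by decide)
    · exact hnd

-- ===== VERDICT =====
theorem compute_node_data_domains_spec : Claim_equal_compute_node_data_domains := by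
  intro node_id tool_names state_keys _
  unfold Spec_compute_node_data_domains compute_node_data_domains compute_node_data_domains_alt
  simp only [← List.foldl_append]
  have hperm := sets_perm (tool_names ++ state_keys)
  simp only at hperm
  by_cases hA : (tool_names ++ state_keys).foldl
      (fun d t => PySem.Set.update d (classify_data_domain t)) PySem.Set.empty = []
  · rw [hA] at hperm
    have hBnil := hperm.symm.eq_nil
    rw [hA, hBnil]
    simp [PySem.List.sorted]
  · rw [if_neg (by rw [PySem.List.sorted_eq_nil_iff]; exact hA)]
    rw [if_neg (fun h => hA (by rw [h] at hperm; exact hperm.eq_nil))]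
    exact (PySem.List.sorted_id_eq_sorted_id_iff_perm _ _).mpr hperm
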